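-- pv_equiv track=rewrite | github.com/mitsuhirohayashi/timetable-generator-v5 | scripts/fixes/remove_fictional_teachers.py | replace_teachers
-- ===== SOURCE A (Python) =====
-- from typing import Dict, List, Tuple
--
-- def replace_teachers(data: List[List[str]], fictional_teachers: List[str], real_mapping: Dict[Tuple[str, str, str], str]) -> Tuple[List[List[str]], List[str]]:
--     """架空の教師を実在の教師に置き換え"""
--     new_data = [data[0]]  # ヘッダーを保持
--     replacements = []
--     removed_rows = []
--
--     for row in data[1:]:
--         if len(row) >= 4:
--             if row[0] in fictional_teachers:
--                 key = (row[1], row[2], row[3])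
--                 if key in real_mapping:
--                     new_row = [real_mapping[key], row[1], row[2], row[3]]
--                     new_data.append(new_row)
--                     replacements.append(f"{row[0]} -> {real_mapping[key]} ({row[1]}, {row[2]}年{row[3]}組)")
--                 else:
--                     # マッピングが見つからない場合は行を削除
--                     removed_rows.append(f"{row[0]} ({row[1]}, {row[2]}年{row[3]}組)")
--             else:
--                 new_data.append(row)
--         else:
--             new_data.append(row)
--
--     return new_data, replacements, removed_rows
-- ===== SOURCE B (Python) =====
-- def replace_teachers(data, fictional_teachers, real_mapping):
--     """架空の教師を実在の教師に置き換え (three independent passes)"""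
--     def replaced(row):
--         return len(row) >= 4 and row[0] in fictional_teachers and (row[1], row[2], row[3]) in real_mapping
--
--     def dropped(row):
--         return len(row) >= 4 and row[0] in fictional_teachers and (row[1], row[2], row[3]) not in real_mapping
--
--     new_data = [data[0]] + [
--         ([real_mapping[(row[1], row[2], row[3])], row[1], row[2], row[3]] if replaced(row) else row)
--         for row in data[1:] if not dropped(row)
--     ]
--     replacements = [
--         f"{row[0]} -> {real_mapping[(row[1], row[2], row[3])]} ({row[1]}, {row[2]}年{row[3]}組)"
--         for row in data[1:] if replaced(row)
--     ]
--     removed_rows = [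
--         f"{row[0]} ({row[1]}, {row[2]}年{row[3]}組)"
--         for row in data[1:] if dropped(row)
--     ]
--     return new_data, replacements, removed_rows
-- ===== Notes on version B (the rewrite author's own statement) =====
-- stated objective: alternative
-- what changed: Replaces the single accumulator loop with shared branch state by three independent filter/map passes over data[1:], one per output component.
-- outside the precondition, e.g. on replace_teachers([], [], {}): A raises IndexError, B raises IndexError
import Mathlib
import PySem

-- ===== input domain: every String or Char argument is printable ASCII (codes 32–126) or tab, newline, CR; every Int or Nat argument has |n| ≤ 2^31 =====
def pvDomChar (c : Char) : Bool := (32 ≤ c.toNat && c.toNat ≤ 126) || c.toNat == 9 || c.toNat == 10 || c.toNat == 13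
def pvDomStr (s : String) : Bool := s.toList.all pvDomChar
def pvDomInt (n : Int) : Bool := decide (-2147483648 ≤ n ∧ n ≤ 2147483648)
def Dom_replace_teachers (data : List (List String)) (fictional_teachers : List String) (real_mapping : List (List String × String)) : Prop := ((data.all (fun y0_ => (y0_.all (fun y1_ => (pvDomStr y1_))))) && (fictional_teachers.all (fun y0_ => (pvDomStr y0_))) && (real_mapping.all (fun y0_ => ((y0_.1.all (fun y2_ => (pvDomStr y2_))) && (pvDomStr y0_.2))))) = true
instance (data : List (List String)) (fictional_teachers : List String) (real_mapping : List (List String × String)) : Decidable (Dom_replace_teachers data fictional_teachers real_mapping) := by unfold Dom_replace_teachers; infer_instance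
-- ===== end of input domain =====

-- B rebuilds each of the three outputs by its own independent filter/map pass over data[1:],
-- instead of A's single loop pushing onto three shared accumulators. Same cost (objective: alternative).
-- Pre_ only excludes empty data, on which A raises IndexError at data[0].

-- ===== PORT A =====
-- f-string "{t} -> {v} ({s}, {g}年{c}組)"
def fmtRepl (t v s g c : String) : String := t ++ " -> " ++ v ++ " (" ++ s ++ ", " ++ g ++ "年" ++ c ++ "組)"
-- f-string "{t} ({s}, {g}年{c}組)"
def fmtRem (t s g c : String) : String := t ++ " (" ++ s ++ ", " ++ g ++ "年" ++ c ++ "組)"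

-- one iteration of A's for-loop: state is (new_data, replacements, removed_rows), appended at the back
def stepA (fictional_teachers : List String) (real_mapping : List (List String × String))
    (st : List (List String) × List String × List String) (row : List String) :
    List (List String) × List String × List String :=
  match row with
  | t :: s :: g :: c :: _ =>          -- len(row) >= 4
    if fictional_teachers.contains t then
      match real_mapping.lookup [s, g, c] with
      | some v => (st.1 ++ [[v, s, g, c]], st.2.1 ++ [fmtRepl t v s g c], st.2.2)
      | none => (st.1, st.2.1, st.2.2 ++ [fmtRem t s g c])
    else (st.1 ++ [row], st.2.1, st.2.2)
  | _ => (st.1 ++ [row], st.2.1, st.2.2)   -- len(row) < 4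

def replace_teachers (data : List (List String)) (fictional_teachers : List String) (real_mapping : List (List String × String)) : List (List String) × List String × List String :=
  (data.tail).foldl (stepA fictional_teachers real_mapping) ([data.headD []], [], [])

-- ===== PORT B =====
def replacedB (fictional_teachers : List String) (real_mapping : List (List String × String)) (row : List String) : Bool :=
  match row with
  | t :: s :: g :: c :: _ => fictional_teachers.contains t && (real_mapping.lookup [s, g, c]).isSome
  | _ => false

def droppedB (fictional_teachers : List String) (real_mapping : List (List String × String)) (row : List String) : Bool :=
  match row with
  | t :: s :: g :: c :: _ => fictional_teachers.contains t && (real_mapping.lookup [s, g, c]).isNone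
  | _ => false

def transformB (real_mapping : List (List String × String)) (row : List String) : List String :=
  match row with
  | _ :: s :: g :: c :: _ =>
    match real_mapping.lookup [s, g, c] with
    | some v => [v, s, g, c]
    | none => row
  | _ => row

def fmtReplB (real_mapping : List (List String × String)) (row : List String) : String :=
  match row with
  | t :: s :: g :: c :: _ =>
    match real_mapping.lookup [s, g, c] with
    | some v => fmtRepl t v s g c
    | none => ""
  | _ => ""

def fmtRemB (row : List String) : String :=
  match row with
  | t :: s :: g :: c :: _ => fmtRem t s g c
  | _ => ""

def replace_teachers_alt (data : List (List String)) (fictional_teachers : List String) (real_mapping : List (List String × String)) : List (List String) × List String × List String :=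
  ( data.headD [] ::
      ((data.tail.filter (fun r => !droppedB fictional_teachers real_mapping r)).map
        (fun r => if replacedB fictional_teachers real_mapping r then transformB real_mapping r else r)),
    (data.tail.filter (replacedB fictional_teachers real_mapping)).map (fmtReplB real_mapping),
    (data.tail.filter (droppedB fictional_teachers real_mapping)).map fmtRemB )

-- ===== PRECONDITION & SPEC =====
-- Pre_ excludes only data = [], on which A raises IndexError at data[0] (B raises too).
def Pre_replace_teachers (data : List (List String)) (fictional_teachers : List String) (real_mapping : List (List String × String)) : Prop := data ≠ []
instance (data : List (List String)) (fictional_teachers : List String) (real_mapping : List (List String × String)) : Decidable (Pre_replace_teachers data fictional_teachers real_mapping) := by unfold Pre_replace_teachers; infer_instance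
def pvWitness_replace_teachers : List (List String) × List String × (List (List String × String)) :=
  ([["h"], ["X", "Math", "1", "2"], ["Y", "Sci", "2", "3"], ["Z"]], ["X", "Y"], [(["Math", "1", "2"], "R")])

def Spec_replace_teachers (data : List (List String)) (fictional_teachers : List String) (real_mapping : List (List String × String)) (out : List (List String) × List String × List String) : Prop := out = replace_teachers_alt data fictional_teachers real_mapping
instance (data : List (List String)) (fictional_teachers : List String) (real_mapping : List (List String × String)) (out : List (List String) × List String × List String) : Decidable (Spec_replace_teachers data fictional_teachers real_mapping out) := by unfold Spec_replace_teachers; infer_instance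

-- ===== CLAIM (what is proved, stated in full; the proofs are below) =====
def Claim_equal_replace_teachers : Prop := ∀ (data : List (List String)) (fictional_teachers : List String) (real_mapping : List (List String × String)), Dom_replace_teachers data fictional_teachers real_mapping → Pre_replace_teachers data fictional_teachers real_mapping → Spec_replace_teachers data fictional_teachers real_mapping (replace_teachers data fictional_teachers real_mapping)

-- ===== LEMMAS AND PROOFS =====

-- the loop invariant: A's foldl appends exactly B's three passes to any starting state
theorem foldl_stepA (fict : List String) (mp : List (List String × String)) :
    ∀ (rows : List (List String)) (nd : List (List String)) (rp rm : List String),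
    rows.foldl (stepA fict mp) (nd, rp, rm) =
      ( nd ++ ((rows.filter (fun r => !droppedB fict mp r)).map
                (fun r => if replacedB fict mp r then transformB mp r else r)),
        rp ++ (rows.filter (replacedB fict mp)).map (fmtReplB mp),
        rm ++ (rows.filter (droppedB fict mp)).map fmtRemB ) := by
  intro rows
  induction rows with
  | nil => intro nd rp rm; simp
  | cons row rows ih =>
    intro nd rp rm
    simp only [List.foldl_cons]
    match row with
    | [] => simp [stepA, droppedB, replacedB, ih]
    | [a] => simp [stepA, droppedB, replacedB, ih]
    | [a, b] => simp [stepA, droppedB, replacedB, ih]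
    | [a, b, c] => simp [stepA, droppedB, replacedB, ih]
    | t :: s :: g :: c :: rest =>
      by_cases hf : t ∈ fict
      · cases hv : mp.lookup [s, g, c] with
        | some v =>
          simp [stepA, hf, hv, ih, droppedB, replacedB, transformB, fmtReplB]
        | none =>
          simp [stepA, hf, hv, ih, droppedB, replacedB, fmtRemB]
      · simp [stepA, hf, ih, droppedB, replacedB]

-- ===== VERDICT (by name: the statement is the Claim_ definition above) =====
theorem replace_teachers_spec : Claim_equal_replace_teachers := by
  intro data fict mp _ _
  unfold Spec_replace_teachers replace_teachers replace_teachers_alt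
  rw [foldl_stepA]
  simp
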